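-- pv_equiv track=rewrite | github.com/mikejc58/AdventOfCode | Y2021/Day23/advent_puzzle.py | prepare_input_list
-- ===== SOURCE A (Python) =====
-- def prepare_input_list(lines):
--     """create a list of the input"""
--     rooms1 = [[], [], [], []]
--     rooms2 = [[], [], [], []]
--     fill_rooms = rooms1
--     for line in lines:
--         if line == '':
--             fill_rooms = rooms2
--             continue
--         if line[0] == ' ':
--             fill_rooms[0].append(line[3])
--             fill_rooms[1].append(line[5])
--             fill_rooms[2].append(line[7])
--             fill_rooms[3].append(line[9])
--
--     rooms1[0] = tuple(rooms1[0])
--     rooms1[1] = tuple(rooms1[1])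
--     rooms1[2] = tuple(rooms1[2])
--     rooms1[3] = tuple(rooms1[3])
--     rooms1 = tuple(rooms1)
--
--     rooms2[0] = tuple(rooms2[0])
--     rooms2[1] = tuple(rooms2[1])
--     rooms2[2] = tuple(rooms2[2])
--     rooms2[3] = tuple(rooms2[3])
--     rooms2 = tuple(rooms2)
--
--     return (rooms1, rooms2)
-- ===== SOURCE B (Python) =====
-- def prepare_input_list(lines):
--     """create a list of the input"""
--     k = lines.index('') if '' in lines else len(lines)
--
--     def rooms(block):
--         kept = [line for line in block if line and line[0] == ' ']
--         return tuple(tuple(line[i] for line in kept) for i in (3, 5, 7, 9))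
--
--     return (rooms(lines[:k]), rooms(lines[k + 1:]))
-- ===== Notes on version B (the rewrite author's own statement) =====
-- stated objective: simpler
-- what changed: Replaces the stateful row-by-row loop with a switching fill pointer by splitting the lines at the first blank line and building each room as a column-major comprehension over the kept lines of each block.
import Mathlib
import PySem

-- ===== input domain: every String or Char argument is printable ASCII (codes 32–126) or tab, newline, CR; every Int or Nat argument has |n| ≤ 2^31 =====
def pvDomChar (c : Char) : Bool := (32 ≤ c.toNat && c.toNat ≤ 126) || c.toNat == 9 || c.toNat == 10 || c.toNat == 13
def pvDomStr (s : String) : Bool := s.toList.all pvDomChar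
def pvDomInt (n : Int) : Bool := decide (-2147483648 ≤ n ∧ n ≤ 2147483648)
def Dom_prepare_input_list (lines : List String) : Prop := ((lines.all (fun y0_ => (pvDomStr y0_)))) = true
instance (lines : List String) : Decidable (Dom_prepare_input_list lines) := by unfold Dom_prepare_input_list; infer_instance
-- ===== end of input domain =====

-- B changes the decomposition only (split at the first blank line, then a column-major transpose
-- of the kept lines) — objective: simpler; same O(n) cost.

-- shared primitive: Python's line[i] as a 1-character string (none = IndexError, excluded by Pre_)
def pyCharAt (l : String) (i : Int) : String :=
  match PySem.Str.pyGet? l i with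
  | some c => String.ofList [c]
  | none => ""

-- ===== PORT A =====
-- the four rooms of one side, as Python's list of four lists
abbrev QRooms := List String × List String × List String × List String

def pushA (r : QRooms) (l : String) : QRooms :=
  (r.1 ++ [pyCharAt l 3], r.2.1 ++ [pyCharAt l 5], r.2.2.1 ++ [pyCharAt l 7], r.2.2.2 ++ [pyCharAt l 9])

-- the for-loop: fill_rooms starts at rooms1 (f = false) and is switched to rooms2 (f = true) on ''
def loopA : QRooms → QRooms → Bool → List String → QRooms × QRooms
  | r1, r2, _, [] => (r1, r2)
  | r1, r2, f, l :: rest =>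
    if l = "" then loopA r1 r2 true rest
    else if pyCharAt l 0 = " " then
      (if f then loopA r1 (pushA r2 l) true rest else loopA (pushA r1 l) r2 false rest)
    else loopA r1 r2 f rest

def prepare_input_list (lines : List String) : List (List String) × List (List String) :=
  let q := loopA ([], [], [], []) ([], [], [], []) false lines
  ([q.1.1, q.1.2.1, q.1.2.2.1, q.1.2.2.2], [q.2.1, q.2.2.1, q.2.2.2.1, q.2.2.2.2])

-- ===== PORT B =====
def keptB (block : List String) : List String :=
  block.filter (fun l => decide (l ≠ "") && (pyCharAt l 0 == " "))

def roomsB (block : List String) : List (List String) :=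
  ([3, 5, 7, 9] : List Int).map (fun i => (keptB block).map (fun l => pyCharAt l i))

def prepare_input_list_alt (lines : List String) : List (List String) × List (List String) :=
  let k : Nat := match PySem.List.index? lines "" with | some k => k | none => lines.length
  (roomsB (PySem.List.slice lines none (some (k : Int))),
   roomsB (PySem.List.slice lines (some ((k : Int) + 1)) none))

-- ===== PRECONDITION & SPEC =====
-- Pre_ excludes exactly the inputs on which Python A raises IndexError: a non-blank line that
-- starts with ' ' but is shorter than 10 characters.
def Pre_prepare_input_list (lines : List String) : Prop :=
  ∀ l ∈ lines, l ≠ "" → l.toList[0]? = some ' ' → 10 ≤ l.toList.length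
instance (lines : List String) : Decidable (Pre_prepare_input_list lines) := by
  unfold Pre_prepare_input_list; infer_instance

def pvWitness_prepare_input_list : List String :=
  ["xx", " ##A#B#C#D", "", " ##E#F#G#H"]

def Spec_prepare_input_list (lines : List String) (out : List (List String) × List (List String)) : Prop := out = prepare_input_list_alt lines
instance (lines : List String) (out : List (List String) × List (List String)) : Decidable (Spec_prepare_input_list lines out) := by unfold Spec_prepare_input_list; infer_instance

-- ===== CLAIM (what is proved, stated in full; the proofs are below) =====
def Claim_equal_prepare_input_list : Prop := ∀ (lines : List String), Dom_prepare_input_list lines → Pre_prepare_input_list lines → Spec_prepare_input_list lines (prepare_input_list lines)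

-- ===== LEMMAS AND PROOFS =====
def colQ (ks : List String) : QRooms :=
  (ks.map (pyCharAt · 3), ks.map (pyCharAt · 5), ks.map (pyCharAt · 7), ks.map (pyCharAt · 9))

def appQ (r s : QRooms) : QRooms :=
  (r.1 ++ s.1, r.2.1 ++ s.2.1, r.2.2.1 ++ s.2.2.1, r.2.2.2 ++ s.2.2.2)

theorem loopA_phase2 (ls : List String) : ∀ r1 r2 : QRooms,
    loopA r1 r2 true ls = (r1, appQ r2 (colQ (keptB ls))) := by
  induction ls with
  | nil => intro r1 r2; simp [loopA, keptB, colQ, appQ]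
  | cons l rest ih =>
    intro r1 r2
    by_cases hb : l = ""
    · simp [loopA, hb, keptB, ih]
    · by_cases hs : pyCharAt l 0 = " "
      · simp [loopA, hb, hs, ih, keptB, colQ, appQ, pushA]
      · simp [loopA, hb, hs, ih, keptB]

theorem loopA_phase1 (ls : List String) : ∀ r1 : QRooms,
    loopA r1 ([], [], [], []) false ls =
      match PySem.List.index? ls "" with
      | none => (appQ r1 (colQ (keptB ls)), ([], [], [], []))
      | some k => (appQ r1 (colQ (keptB (ls.take k))), colQ (keptB (ls.drop (k + 1)))) := by
  induction ls with
  | nil =>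
    intro r1
    simp [loopA, PySem.List.index?, keptB, colQ, appQ]
  | cons l rest ih =>
    intro r1
    by_cases hb : l = ""
    · subst hb
      rw [PySem.List.index?_cons_self]
      simp only [List.take_zero, List.drop_succ_cons, List.drop_zero]
      simp [loopA, loopA_phase2, keptB, colQ, appQ]
    · rw [PySem.List.index?_cons_of_ne rest hb]
      have hstep : loopA r1 ([], [], [], []) false (l :: rest) =
          if pyCharAt l 0 = " " then loopA (pushA r1 l) ([], [], [], []) false rest
          else loopA r1 ([], [], [], []) false rest := by
        simp [loopA, hb]
      by_cases hs : pyCharAt l 0 = " "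
      · rw [hstep, if_pos hs, ih]
        have hk : ∀ xs : List String, keptB (l :: xs) = l :: keptB xs := by
          intro xs; simp [keptB, hb, hs]
        cases hix : PySem.List.index? rest "" with
        | none => simp [hk, colQ, appQ, pushA, List.append_assoc]
        | some k => simp [hk, colQ, appQ, pushA, List.append_assoc]
      · rw [hstep, if_neg hs, ih]
        have hk : ∀ xs : List String, keptB (l :: xs) = keptB xs := by
          intro xs; simp [keptB, hb, hs]
        cases hix : PySem.List.index? rest "" with
        | none => simp [hk]
        | some k => simp [hk]

-- ===== VERDICT (by name: the statement is the Claim_ definition above) =====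
theorem prepare_input_list_spec : Claim_equal_prepare_input_list := by
  intro lines _ _
  unfold Spec_prepare_input_list prepare_input_list prepare_input_list_alt
  rw [loopA_phase1]
  cases hix : PySem.List.index? lines "" with
  | none =>
    have hnm : "" ∉ lines := (PySem.List.index?_eq_none_iff lines "").mp hix
    have htk : PySem.List.slice lines none (some ((lines.length : Nat) : Int)) = lines := by
      rw [PySem.List.slice_to_natCast]; simp
    have hdr : PySem.List.slice lines (some (((lines.length : Nat) : Int) + 1)) none = [] := by
      rw [show ((lines.length : Nat) : Int) + 1 = ((lines.length + 1 : Nat) : Int) by push_cast; ring,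
          PySem.List.slice_from_natCast]
      simp
    simp [htk, hdr, roomsB, colQ, appQ, keptB]
  | some k =>
    have htk : PySem.List.slice lines none (some ((k : Nat) : Int)) = lines.take k := by
      rw [PySem.List.slice_to_natCast]
    have hdr : PySem.List.slice lines (some (((k : Nat) : Int) + 1)) none = lines.drop (k + 1) := by
      rw [show ((k : Nat) : Int) + 1 = ((k + 1 : Nat) : Int) by push_cast; ring,
          PySem.List.slice_from_natCast]
    simp [htk, hdr, roomsB, colQ, appQ]
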